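-- pv_equiv track=rewrite | github.com/VladPohorielov/AI-bot | services/phone_extractor.py | _detect_phone_type
-- ===== SOURCE A (Python) =====
-- def _detect_phone_type(formatted: str) -> str:
--     """Detect if mobile, landline, etc."""
--     if "+380" in formatted:
--         # Ukrainian mobile operators
--         mobile_prefixes = ["50", "63", "66", "67", "68", "91", "92", "93", "94", "95", "96", "97", "98", "99"]
--         for prefix in mobile_prefixes:
--             if f" {prefix} " in formatted:
--                 return "mobile"
--
--         # Kyiv landline
--         if " 44 " in formatted:
--             return "landline"
--
--         return "unknown"
--
--     return "international"
-- ===== SOURCE B (Python) =====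
-- MOBILE = {"50", "63", "66", "67", "68", "91", "92", "93", "94", "95", "96", "97", "98", "99"}
--
--
-- def _detect_phone_type(formatted: str) -> str:
--     """Detect if mobile, landline, etc. — single sliding-window pass instead of 14 substring scans."""
--     if "+380" not in formatted:
--         return "international"
--     saw_kyiv = False
--     for i in range(len(formatted) - 3):
--         if formatted[i] == " " and formatted[i + 3] == " ":
--             two = formatted[i + 1:i + 3]
--             if two in MOBILE:
--                 return "mobile"
--             if two == "44":
--                 saw_kyiv = True
--     return "landline" if saw_kyiv else "unknown"
-- ===== Notes on version B (the rewrite author's own statement) =====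
-- stated objective: alternative
-- what changed: B replaces A's 15 separate substring scans (one per two-digit prefix plus the landline check) by a single left-to-right sliding-window pass that inspects each space-delimited two-digit window once and classifies it via one set membership.
import Mathlib
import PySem

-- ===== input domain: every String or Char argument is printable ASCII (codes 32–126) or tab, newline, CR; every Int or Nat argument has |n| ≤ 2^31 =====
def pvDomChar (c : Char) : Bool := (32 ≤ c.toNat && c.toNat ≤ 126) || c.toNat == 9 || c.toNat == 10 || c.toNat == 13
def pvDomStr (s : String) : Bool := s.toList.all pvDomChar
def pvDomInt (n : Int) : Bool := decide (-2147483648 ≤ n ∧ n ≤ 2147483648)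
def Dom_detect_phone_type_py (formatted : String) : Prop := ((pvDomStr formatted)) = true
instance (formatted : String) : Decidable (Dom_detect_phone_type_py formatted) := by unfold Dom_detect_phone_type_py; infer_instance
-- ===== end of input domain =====

-- B replaces A's 15 separate substring scans by one sliding-window pass; same return value everywhere.

-- ===== PORT A =====
-- A's local list `mobile_prefixes` (two-digit strings, as char lists).
def pvMobilePrefixes : List (List Char) :=
  [['5','0'], ['6','3'], ['6','6'], ['6','7'], ['6','8'], ['9','1'], ['9','2'], ['9','3'],
   ['9','4'], ['9','5'], ['9','6'], ['9','7'], ['9','8'], ['9','9']]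

-- A's `for prefix in mobile_prefixes: if f" {prefix} " in formatted: return "mobile"`,
-- falling through to the `" 44 "` landline check and the "unknown" default.
def pvALoop (cs : List Char) : List (List Char) → String
  | [] => if PySem.Chars.isIn [' ', '4', '4', ' '] cs then "landline" else "unknown"
  | p :: rest =>
      if PySem.Chars.isIn (' ' :: p ++ [' ']) cs then "mobile" else pvALoop cs rest

def detect_phone_type_py (formatted : String) : String :=
  if PySem.Str.isIn "+380" formatted then pvALoop formatted.toList pvMobilePrefixes
  else "international"

-- ===== PORT B =====
-- B's module-level set literal MOBILE (all elements distinct).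
def pvMobileSet : PySem.Set (List Char) :=
  PySem.Set.ofList
    [['5','0'], ['6','3'], ['6','6'], ['6','7'], ['6','8'], ['9','1'], ['9','2'], ['9','3'],
     ['9','4'], ['9','5'], ['9','6'], ['9','7'], ['9','8'], ['9','9']]

-- B's index loop `for i in range(len(formatted) - 3)` over 4-char windows, carrying the
-- `saw_kyiv` flag; the window formatted[i] / formatted[i+1:i+3] / formatted[i+3] is the
-- destructured head of the current suffix.
def pvBScan : List Char → Bool → String
  | c0 :: rest, sawKyiv =>
      match rest with
      | c1 :: c2 :: c3 :: _ =>
          if (c0 == ' ') && (c3 == ' ') && PySem.Set.contains pvMobileSet [c1, c2] then "mobile"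
          else pvBScan rest (sawKyiv || ((c0 == ' ') && (c1 == '4') && (c2 == '4') && (c3 == ' ')))
      | _ => if sawKyiv then "landline" else "unknown"
  | [], sawKyiv => if sawKyiv then "landline" else "unknown"

def detect_phone_type_py_alt (formatted : String) : String :=
  if PySem.Str.isIn "+380" formatted then pvBScan formatted.toList false
  else "international"

-- ===== PRECONDITION & SPEC =====
def Spec_detect_phone_type_py (formatted : String) (out : String) : Prop := out = detect_phone_type_py_alt formatted
instance (formatted : String) (out : String) : Decidable (Spec_detect_phone_type_py formatted out) := by unfold Spec_detect_phone_type_py; infer_instance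

-- ===== CLAIM (what is proved, stated in full; the proofs are below) =====
def Claim_equal_detect_phone_type_py : Prop := ∀ (formatted : String), Dom_detect_phone_type_py formatted → Spec_detect_phone_type_py formatted (detect_phone_type_py formatted)

-- ===== LEMMAS AND PROOFS =====

-- the spaced pattern f" {prefix} "
def pvSpaced (p : List Char) : List Char := ' ' :: p ++ [' ']

-- "some mobile marker occurs" / "the Kyiv marker occurs"
abbrev pvMob (cs : List Char) : Prop := ∃ p ∈ pvMobilePrefixes, pvSpaced p <:+: cs
abbrev pvL44 (cs : List Char) : Prop := [' ', '4', '4', ' '] <:+: cs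

lemma pvShape : ∀ p ∈ pvMobilePrefixes, ∃ a b, p = [a, b] := by
  intro p hp; fin_cases hp <;> exact ⟨_, _, rfl⟩

lemma pvNotInfix_short (p cs : List Char) (h : cs.length < p.length) : ¬ p <:+: cs :=
  fun hi => absurd hi.length_le (by omega)

lemma pvALoop_eq (cs : List Char) (ps : List (List Char)) :
    pvALoop cs ps =
      if (∃ p ∈ ps, pvSpaced p <:+: cs) then "mobile"
      else if pvL44 cs then "landline" else "unknown" := by
  induction ps with
  | nil =>
      by_cases h : pvL44 cs
      · have hb : PySem.Chars.isIn [' ', '4', '4', ' '] cs = true := by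
          rw [PySem.Chars.isIn_iff_infix]; exact h
        simp [pvALoop, hb, h]
      · have hb : PySem.Chars.isIn [' ', '4', '4', ' '] cs = false := by
          rw [PySem.Chars.isIn_eq_false_iff]; exact h
        simp [pvALoop, hb, h]
  | cons p ps ih =>
      by_cases h : pvSpaced p <:+: cs
      · have hb : PySem.Chars.isIn (' ' :: (p ++ [' '])) cs = true := by
          rw [PySem.Chars.isIn_iff_infix]; simpa [pvSpaced] using h
        have hex : ∃ q ∈ p :: ps, pvSpaced q <:+: cs := ⟨p, by simp, h⟩
        simp [pvALoop, hb]
        exact fun hc _ => absurd h hc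
      · have hb : PySem.Chars.isIn (' ' :: (p ++ [' '])) cs = false := by
          rw [PySem.Chars.isIn_eq_false_iff]; simpa [pvSpaced] using h
        simp [pvALoop, hb, ih, h]

lemma pvSetMem (x : List Char) : x ∈ pvMobileSet ↔ x ∈ pvMobilePrefixes := by
  rw [pvMobileSet, PySem.Set.mem_ofList]; exact Iff.rfl

lemma pvMobWindow (c0 c1 c2 c3 : Char) (t : List Char) :
    (∃ p ∈ pvMobilePrefixes, pvSpaced p <+: c0 :: c1 :: c2 :: c3 :: t) ↔
      (c0 = ' ' ∧ c3 = ' ' ∧ [c1, c2] ∈ pvMobilePrefixes) := by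
  constructor
  · rintro ⟨p, hp, hpre⟩
    obtain ⟨a, b, rfl⟩ := pvShape p hp
    simp [pvSpaced, List.cons_prefix_cons] at hpre
    obtain ⟨h0, h1, h2, h3⟩ := hpre
    subst h0 h1 h2 h3; exact ⟨rfl, rfl, hp⟩
  · rintro ⟨h0, h3, hm⟩
    exact ⟨[c1, c2], hm, by simp [pvSpaced, List.cons_prefix_cons, h0, h3]⟩

set_option maxHeartbeats 1600000 in
lemma pvBScan_eq (cs : List Char) : ∀ sawKyiv : Bool,
    pvBScan cs sawKyiv =
      if pvMob cs then "mobile"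
      else if (sawKyiv = true ∨ pvL44 cs) then "landline" else "unknown" := by
  induction cs with
  | nil =>
      intro sk
      simp [pvBScan, pvSpaced]
  | cons c0 rest ih =>
      intro sk
      rcases rest with _ | ⟨c1, _ | ⟨c2, _ | ⟨c3, t⟩⟩⟩
      · have hM : ¬ pvMob [c0] := by
          rintro ⟨p, hp, hi⟩; obtain ⟨a, b, rfl⟩ := pvShape p hp
          exact pvNotInfix_short _ _ (by simp [pvSpaced]) hi
        have hL : ¬ pvL44 [c0] := pvNotInfix_short _ _ (by simp)
        simp [pvBScan, hM, hL]
      · have hM : ¬ pvMob [c0, c1] := by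
          rintro ⟨p, hp, hi⟩; obtain ⟨a, b, rfl⟩ := pvShape p hp
          exact pvNotInfix_short _ _ (by simp [pvSpaced]) hi
        have hL : ¬ pvL44 [c0, c1] := pvNotInfix_short _ _ (by simp)
        simp [pvBScan, hM, hL]
      · have hM : ¬ pvMob [c0, c1, c2] := by
          rintro ⟨p, hp, hi⟩; obtain ⟨a, b, rfl⟩ := pvShape p hp
          exact pvNotInfix_short _ _ (by simp [pvSpaced]) hi
        have hL : ¬ pvL44 [c0, c1, c2] := pvNotInfix_short _ _ (by simp)
        simp [pvBScan, hM, hL]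
      · have hMc : pvMob (c0 :: c1 :: c2 :: c3 :: t) ↔
            (c0 = ' ' ∧ c3 = ' ' ∧ [c1, c2] ∈ pvMobilePrefixes) ∨ pvMob (c1 :: c2 :: c3 :: t) := by
          rw [show pvMob (c0 :: c1 :: c2 :: c3 :: t) ↔
              (∃ p ∈ pvMobilePrefixes, pvSpaced p <+: c0 :: c1 :: c2 :: c3 :: t) ∨
                pvMob (c1 :: c2 :: c3 :: t) by
            simp [pvMob, List.infix_cons_iff, and_or_left, exists_or]]
          rw [pvMobWindow]
        have hLc : pvL44 (c0 :: c1 :: c2 :: c3 :: t) ↔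
            (c0 = ' ' ∧ c1 = '4' ∧ c2 = '4' ∧ c3 = ' ') ∨ pvL44 (c1 :: c2 :: c3 :: t) := by
          unfold pvL44
          rw [List.infix_cons_iff]
          constructor
          · rintro (h | h)
            · left; simp [List.cons_prefix_cons] at h; tauto
            · right; exact h
          · rintro (⟨h0, h1, h2, h3⟩ | h)
            · left; simp [List.cons_prefix_cons, h0, h1, h2, h3]
            · right; exact h
        rw [show pvBScan (c0 :: c1 :: c2 :: c3 :: t) sk =
            (if (c0 == ' ') && (c3 == ' ') && PySem.Set.contains pvMobileSet [c1, c2] then "mobile"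
             else pvBScan (c1 :: c2 :: c3 :: t)
               (sk || ((c0 == ' ') && (c1 == '4') && (c2 == '4') && (c3 == ' ')))) from rfl]
        rw [ih]
        simp only [Bool.or_eq_true, Bool.and_eq_true, beq_iff_eq, PySem.Set.contains_iff,
          pvSetMem, hMc, hLc, and_assoc, or_assoc]
        by_cases hW : c0 = ' ' ∧ c3 = ' ' ∧ [c1, c2] ∈ pvMobilePrefixes
        · rw [if_pos hW, if_pos (show (c0 = ' ' ∧ c3 = ' ' ∧ [c1, c2] ∈ pvMobilePrefixes) ∨
            pvMob (c1 :: c2 :: c3 :: t) from Or.inl hW)]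
        · rw [if_neg hW]
          by_cases hM : pvMob (c1 :: c2 :: c3 :: t)
          · rw [if_pos hM, if_pos (show (c0 = ' ' ∧ c3 = ' ' ∧ [c1, c2] ∈ pvMobilePrefixes) ∨
              pvMob (c1 :: c2 :: c3 :: t) from Or.inr hM)]
          · rw [if_neg hM]
            rw [if_neg (show ¬((c0 = ' ' ∧ c3 = ' ' ∧ [c1, c2] ∈ pvMobilePrefixes) ∨
              pvMob (c1 :: c2 :: c3 :: t)) from fun h => h.elim hW hM)]

-- ===== VERDICT (by name: the statement is the Claim_ definition above) =====
theorem detect_phone_type_py_spec : Claim_equal_detect_phone_type_py := by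
  intro f _
  unfold Spec_detect_phone_type_py detect_phone_type_py detect_phone_type_py_alt
  by_cases h : PySem.Str.isIn "+380" f = true
  · rw [if_pos h, if_pos h, pvALoop_eq, pvBScan_eq]
    simp
  · rw [if_neg h, if_neg h]
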